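-- pv_equiv track=rewrite | github.com/pypi-data/pypi-mirror-31 | packages/IRTools/IRTools-1.1.4.8-py2-none-any.whl/IRTools/quant_IRC.py | find_pos_in_bisect_list
-- ===== SOURCE A (Python) =====
-- import bisect
--
-- def find_pos_in_bisect_list(pos_list, start_list, end_list):
--         start_index_set = set()
--         end_index_set = set()
--         for pos in pos_list:
--                 start_index = bisect.bisect_right(start_list, pos)
--                 end_index = bisect.bisect_left(end_list, pos)
--                 start_index_set.add(start_index)
--                 end_index_set.add(end_index)
--         if len(start_index_set) == len(end_index_set) == 1:
--                 if list(start_index_set)[0] - list(end_index_set)[0] == 1: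
--                         return list(end_index_set)[0]
--                 else:
--                         return -1
--         else:
--                 return -2
-- ===== SOURCE B (Python) =====
-- import bisect
--
-- def find_pos_in_bisect_list(pos_list, start_list, end_list):
--         # binary search (even over an unsorted list) is monotone in the key,
--         # so only the extreme positions need to be bisected
--         if not pos_list:
--                 return -2
--         mn = min(pos_list)
--         mx = max(pos_list)
--         s1 = bisect.bisect_right(start_list, mn)
--         if bisect.bisect_right(start_list, mx) != s1:
--                 return -2
--         e1 = bisect.bisect_left(end_list, mn)
--         if bisect.bisect_left(end_list, mx) != e1:
--                 return -2
--         return e1 if s1 - e1 == 1 else -1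
-- ===== Notes on version B (the rewrite author's own statement) =====
-- stated objective: faster
-- what changed: Instead of bisecting every position and collecting the resulting indices in two sets, B bisects only min(pos_list) and max(pos_list): binary search is monotone in its key, so the index set is a singleton exactly when the two extremes bisect to the same index.
import Mathlib
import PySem

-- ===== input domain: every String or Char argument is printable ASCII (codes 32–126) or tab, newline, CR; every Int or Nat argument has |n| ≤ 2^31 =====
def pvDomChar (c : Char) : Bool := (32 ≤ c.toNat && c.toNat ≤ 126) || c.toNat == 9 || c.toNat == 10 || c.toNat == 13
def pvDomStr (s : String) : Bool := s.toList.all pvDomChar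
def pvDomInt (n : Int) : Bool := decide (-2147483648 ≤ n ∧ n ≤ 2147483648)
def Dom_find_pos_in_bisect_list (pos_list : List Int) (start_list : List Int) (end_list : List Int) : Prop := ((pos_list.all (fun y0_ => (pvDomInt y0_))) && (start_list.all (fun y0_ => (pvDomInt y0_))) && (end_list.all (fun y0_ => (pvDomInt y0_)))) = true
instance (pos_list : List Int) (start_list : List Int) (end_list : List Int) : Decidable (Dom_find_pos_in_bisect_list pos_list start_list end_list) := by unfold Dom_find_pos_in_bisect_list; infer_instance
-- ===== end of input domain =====

-- B bisects only min(pos_list) and max(pos_list) instead of every position (binary search is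
-- monotone in its key, so the index sets are singletons iff the two extremes agree): O(n + log m)
-- instead of A's O(n log m).

-- ===== PORT A =====
def find_pos_in_bisect_list (pos_list : List Int) (start_list : List Int) (end_list : List Int) : Int :=
  let sets := pos_list.foldl
    (fun (acc : PySem.Set Nat × PySem.Set Nat) pos =>
      (PySem.Set.add acc.1 (PySem.List.bisectRight start_list pos),
       PySem.Set.add acc.2 (PySem.List.bisectLeft end_list pos)))
    (PySem.Set.empty, PySem.Set.empty)
  if sets.1.length = sets.2.length ∧ sets.2.length = 1 then
    -- list(s)[0] under the len == 1 guard: the set's unique element, i.e. the head of its list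
    if (sets.1.headD 0 : Int) - (sets.2.headD 0 : Int) = 1 then (sets.2.headD 0 : Int)
    else -1
  else -2

-- ===== PORT B =====
def find_pos_in_bisect_list_alt (pos_list : List Int) (start_list : List Int) (end_list : List Int) : Int :=
  match pos_list with
  | [] => -2
  | p :: rest =>
    let mn := rest.foldl min p      -- min(pos_list)
    let mx := rest.foldl max p      -- max(pos_list)
    let s1 := PySem.List.bisectRight start_list mn
    if PySem.List.bisectRight start_list mx ≠ s1 then -2
    else
      let e1 := PySem.List.bisectLeft end_list mn
      if PySem.List.bisectLeft end_list mx ≠ e1 then -2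
      else if (s1 : Int) - (e1 : Int) = 1 then (e1 : Int) else -1

-- ===== PRECONDITION & SPEC =====
def Spec_find_pos_in_bisect_list (pos_list : List Int) (start_list : List Int) (end_list : List Int) (out : Int) : Prop := out = find_pos_in_bisect_list_alt pos_list start_list end_list
instance (pos_list : List Int) (start_list : List Int) (end_list : List Int) (out : Int) : Decidable (Spec_find_pos_in_bisect_list pos_list start_list end_list out) := by unfold Spec_find_pos_in_bisect_list; infer_instance

-- ===== CLAIM (what is proved, stated in full; the proofs are below) =====
def Claim_equal_find_pos_in_bisect_list : Prop := ∀ (pos_list : List Int) (start_list : List Int) (end_list : List Int), Dom_find_pos_in_bisect_list pos_list start_list end_list → Spec_find_pos_in_bisect_list pos_list start_list end_list (find_pos_in_bisect_list pos_list start_list end_list)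

-- ===== LEMMAS AND PROOFS =====

-- Bounds of the bisect loop: the result stays in [lo, hi].
lemma brLoop_ge (xs : List Int) (x : Int) (fuel : Nat) : ∀ lo hi, lo ≤ PySem.List.bisectRightLoop xs x fuel lo hi := by
  induction fuel with
  | zero => intro lo hi; simp [PySem.List.bisectRightLoop]
  | succ n ih =>
    intro lo hi
    rw [PySem.List.bisectRightLoop]
    split_ifs with hlt
    · cases hx : xs[(lo+hi)/2]? with
      | none => simp
      | some y =>
        simp only
        split_ifs with hy
        · exact ih lo ((lo+hi)/2)
        · exact le_trans (by omega) (ih ((lo+hi)/2 + 1) hi)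
    · exact le_refl lo

lemma brLoop_le (xs : List Int) (x : Int) (fuel : Nat) : ∀ lo hi, lo ≤ hi → PySem.List.bisectRightLoop xs x fuel lo hi ≤ hi := by
  induction fuel with
  | zero => intro lo hi h; simpa [PySem.List.bisectRightLoop] using h
  | succ n ih =>
    intro lo hi h
    rw [PySem.List.bisectRightLoop]
    split_ifs with hlt
    · cases hx : xs[(lo+hi)/2]? with
      | none => simpa
      | some y =>
        simp only
        split_ifs with hy
        · exact le_trans (ih lo ((lo+hi)/2) (by omega)) (by omega)
        · exact ih ((lo+hi)/2 + 1) hi (by omega)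
    · exact h

-- Monotonicity in the key, on an ARBITRARY (not necessarily sorted) list: when the two runs
-- first diverge at a midpoint, the a-run stays left of it and the b-run right of it.
lemma brLoop_mono (xs : List Int) (a b : Int) (hab : a ≤ b) (fuel : Nat) :
    ∀ lo hi, PySem.List.bisectRightLoop xs a fuel lo hi ≤ PySem.List.bisectRightLoop xs b fuel lo hi := by
  induction fuel with
  | zero => intro lo hi; simp [PySem.List.bisectRightLoop]
  | succ n ih =>
    intro lo hi
    rw [PySem.List.bisectRightLoop, PySem.List.bisectRightLoop]
    split_ifs with hlt
    · cases hx : xs[(lo+hi)/2]? with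
      | none => simp
      | some y =>
        simp only
        split_ifs with ha hb hb
        · exact ih lo ((lo+hi)/2)
        · have h1 : PySem.List.bisectRightLoop xs a n lo ((lo+hi)/2) ≤ (lo+hi)/2 :=
            brLoop_le xs a n lo ((lo+hi)/2) (by omega)
          have h2 := brLoop_ge xs b n ((lo+hi)/2 + 1) hi
          omega
        · exact absurd (lt_of_le_of_lt hab hb) ha
        · exact ih ((lo+hi)/2 + 1) hi
    · exact le_refl lo

lemma blLoop_ge (xs : List Int) (x : Int) (fuel : Nat) : ∀ lo hi, lo ≤ PySem.List.bisectLeftLoop xs x fuel lo hi := by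
  induction fuel with
  | zero => intro lo hi; simp [PySem.List.bisectLeftLoop]
  | succ n ih =>
    intro lo hi
    rw [PySem.List.bisectLeftLoop]
    split_ifs with hlt
    · cases hx : xs[(lo+hi)/2]? with
      | none => simp
      | some y =>
        simp only
        split_ifs with hy
        · exact le_trans (by omega) (ih ((lo+hi)/2 + 1) hi)
        · exact ih lo ((lo+hi)/2)
    · exact le_refl lo

lemma blLoop_le (xs : List Int) (x : Int) (fuel : Nat) : ∀ lo hi, lo ≤ hi → PySem.List.bisectLeftLoop xs x fuel lo hi ≤ hi := by
  induction fuel with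
  | zero => intro lo hi h; simpa [PySem.List.bisectLeftLoop] using h
  | succ n ih =>
    intro lo hi h
    rw [PySem.List.bisectLeftLoop]
    split_ifs with hlt
    · cases hx : xs[(lo+hi)/2]? with
      | none => simpa
      | some y =>
        simp only
        split_ifs with hy
        · exact ih ((lo+hi)/2 + 1) hi (by omega)
        · exact le_trans (ih lo ((lo+hi)/2) (by omega)) (by omega)
    · exact h

lemma blLoop_mono (xs : List Int) (a b : Int) (hab : a ≤ b) (fuel : Nat) :
    ∀ lo hi, PySem.List.bisectLeftLoop xs a fuel lo hi ≤ PySem.List.bisectLeftLoop xs b fuel lo hi := by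
  induction fuel with
  | zero => intro lo hi; simp [PySem.List.bisectLeftLoop]
  | succ n ih =>
    intro lo hi
    rw [PySem.List.bisectLeftLoop, PySem.List.bisectLeftLoop]
    split_ifs with hlt
    · cases hx : xs[(lo+hi)/2]? with
      | none => simp
      | some y =>
        simp only
        split_ifs with ha hb hb
        · exact ih ((lo+hi)/2 + 1) hi
        · exact absurd (lt_of_lt_of_le ha hab) hb
        · have h1 : PySem.List.bisectLeftLoop xs a n lo ((lo+hi)/2) ≤ (lo+hi)/2 :=
            blLoop_le xs a n lo ((lo+hi)/2) (by omega)
          have h2 := blLoop_ge xs b n ((lo+hi)/2 + 1) hi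
          omega
        · exact ih lo ((lo+hi)/2)
    · exact le_refl lo

lemma bisectRight_mono (xs : List Int) {a b : Int} (hab : a ≤ b) :
    PySem.List.bisectRight xs a ≤ PySem.List.bisectRight xs b :=
  brLoop_mono xs a b hab xs.length 0 xs.length

lemma bisectLeft_mono (xs : List Int) {a b : Int} (hab : a ≤ b) :
    PySem.List.bisectLeft xs a ≤ PySem.List.bisectLeft xs b :=
  blLoop_mono xs a b hab xs.length 0 xs.length

-- A's pair-of-sets fold splits into two independent set constructions.
lemma foldl_pair_add (start_list end_list : List Int) (l : List Int) (s t : PySem.Set Nat) :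
    l.foldl (fun (acc : PySem.Set Nat × PySem.Set Nat) pos =>
        (PySem.Set.add acc.1 (PySem.List.bisectRight start_list pos),
         PySem.Set.add acc.2 (PySem.List.bisectLeft end_list pos))) (s, t)
      = (List.foldl PySem.Set.add s (l.map (fun q => PySem.List.bisectRight start_list q)),
         List.foldl PySem.Set.add t (l.map (fun q => PySem.List.bisectLeft end_list q))) := by
  induction l generalizing s t with
  | nil => rfl
  | cons x xs ih => simpa using ih _ _

-- set(ys) for a nonempty constant list is the one-element set [y].
lemma ofList_const (ys : List Nat) (y : Nat) (hne : ys ≠ []) (h : ∀ z ∈ ys, z = y) :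
    PySem.Set.ofList ys = [y] := by
  cases ys with
  | nil => exact absurd rfl hne
  | cons x xs =>
    have hx : x = y := h x (by simp)
    rw [PySem.Set.ofList_cons]
    have hd : PySem.Set.discard (PySem.Set.ofList xs) x = [] := by
      rw [List.eq_nil_iff_forall_not_mem]
      intro z hz
      obtain ⟨hz1, hz2⟩ := (PySem.Set.mem_discard _ _ _).1 hz
      exact hz2 (by rw [h z (List.mem_cons_of_mem _ ((PySem.Set.mem_ofList _ _).1 hz1)), hx])
    rw [hd, hx]

-- a singleton set(ys) forces all elements of ys equal.
lemma eq_of_ofList_length_one {ys : List Nat} (h : (PySem.Set.ofList ys).length = 1)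
    {u v : Nat} (hu : u ∈ ys) (hv : v ∈ ys) : u = v := by
  obtain ⟨y, hy⟩ := List.length_eq_one_iff.1 h
  have h1 : u = y := by have := (PySem.Set.mem_ofList _ _).2 hu; rw [hy] at this; simpa using this
  have h2 : v = y := by have := (PySem.Set.mem_ofList _ _).2 hv; rw [hy] at this; simpa using this
  rw [h1, h2]

-- ===== VERDICT (by name: the statement is the Claim_ definition above) =====
theorem find_pos_in_bisect_list_spec : Claim_equal_find_pos_in_bisect_list := by
  intro pos_list start_list end_list _
  unfold Spec_find_pos_in_bisect_list
  cases pos_list with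
  | nil =>
    simp [find_pos_in_bisect_list, find_pos_in_bisect_list_alt, PySem.Set.empty]
  | cons p rest =>
    have hmn_mem : rest.foldl min p ∈ p :: rest := by
      rcases PySem.List.foldl_min_mem rest p with h | h
      · rw [h]; exact List.mem_cons_self
      · exact List.mem_cons_of_mem _ h
    have hmx_mem : rest.foldl max p ∈ p :: rest := by
      rcases PySem.List.foldl_max_mem rest p with h | h
      · rw [h]; exact List.mem_cons_self
      · exact List.mem_cons_of_mem _ h
    have hmn_le : ∀ q ∈ p :: rest, rest.foldl min p ≤ q := by
      intro q hq
      rcases List.mem_cons.1 hq with rfl | hq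
      · exact (PySem.List.foldl_min_le rest q).1
      · exact (PySem.List.foldl_min_le rest p).2 q hq
    have hle_mx : ∀ q ∈ p :: rest, q ≤ rest.foldl max p := by
      intro q hq
      rcases List.mem_cons.1 hq with rfl | hq
      · exact (PySem.List.le_foldl_max rest q).1
      · exact (PySem.List.le_foldl_max rest p).2 q hq
    set mn := rest.foldl min p with hmn
    set mx := rest.foldl max p with hmx
    set Sf := PySem.Set.ofList ((p :: rest).map (fun q => PySem.List.bisectRight start_list q)) with hSf
    set Sg := PySem.Set.ofList ((p :: rest).map (fun q => PySem.List.bisectLeft end_list q)) with hSg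
    have hA : find_pos_in_bisect_list (p :: rest) start_list end_list
        = if Sf.length = Sg.length ∧ Sg.length = 1 then
            if (Sf.headD 0 : Int) - (Sg.headD 0 : Int) = 1 then (Sg.headD 0 : Int) else -1
          else -2 := by
      unfold find_pos_in_bisect_list
      rw [show (PySem.Set.empty, PySem.Set.empty) = ((PySem.Set.empty : PySem.Set Nat), (PySem.Set.empty : PySem.Set Nat)) from rfl,
          foldl_pair_add]
      rfl
    have hfmem : ∀ q ∈ p :: rest, PySem.List.bisectRight start_list q ∈
        (p :: rest).map (fun q => PySem.List.bisectRight start_list q) := by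
      intro q hq; exact List.mem_map.2 ⟨q, hq, rfl⟩
    have hgmem : ∀ q ∈ p :: rest, PySem.List.bisectLeft end_list q ∈
        (p :: rest).map (fun q => PySem.List.bisectLeft end_list q) := by
      intro q hq; exact List.mem_map.2 ⟨q, hq, rfl⟩
    by_cases hf : PySem.List.bisectRight start_list mx = PySem.List.bisectRight start_list mn
    · by_cases hg : PySem.List.bisectLeft end_list mx = PySem.List.bisectLeft end_list mn
      · -- both index sets are singletons
        have hSfv : Sf = [PySem.List.bisectRight start_list mn] := by
          rw [hSf]
          refine ofList_const _ _ (by simp) ?_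
          intro z hz
          obtain ⟨q, hq, rfl⟩ := List.mem_map.1 hz
          have h1 := bisectRight_mono start_list (hmn_le q hq)
          have h2 := bisectRight_mono start_list (hle_mx q hq)
          omega
        have hSgv : Sg = [PySem.List.bisectLeft end_list mn] := by
          rw [hSg]
          refine ofList_const _ _ (by simp) ?_
          intro z hz
          obtain ⟨q, hq, rfl⟩ := List.mem_map.1 hz
          have h1 := bisectLeft_mono end_list (hmn_le q hq)
          have h2 := bisectLeft_mono end_list (hle_mx q hq)
          omega
        rw [hA, hSfv, hSgv]
        simp only [find_pos_in_bisect_list_alt, ← hmn, ← hmx, hf, hg]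
        simp
      · -- end-index set is not a singleton: both return -2
        have hglen : Sg.length ≠ 1 := by
          intro hlen
          exact hg (eq_of_ofList_length_one (hSg ▸ hlen) (hgmem mx hmx_mem) (hgmem mn hmn_mem))
        rw [hA, if_neg (by intro h; exact hglen h.2)]
        simp only [find_pos_in_bisect_list_alt, ← hmn, ← hmx, hf]
        simp [hg]
    · -- start-index set is not a singleton: both return -2
      have hflen : Sf.length ≠ 1 := by
        intro hlen
        exact hf (eq_of_ofList_length_one (hSf ▸ hlen) (hfmem mx hmx_mem) (hfmem mn hmn_mem))
      rw [hA, if_neg (by intro h; exact hflen (h.1.trans h.2))]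
      simp only [find_pos_in_bisect_list_alt, ← hmn, ← hmx]
      simp [hf]
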